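-- pv_equiv track=rewrite | github.com/RobinRodenhausen/adventofcode2024 | 15/day15.py | can_move_box
-- ===== SOURCE A (Python) =====
-- def can_move_box(x: int, y: int, dx: int, dy: int, warehouse: list[list[str]]) -> bool:
--     if dy == 0:
--         b2x, b2y = x + 2 * dx, y
--         if warehouse[b2y][b2x] == "#":
--             return False
--         if warehouse[b2y][b2x] == ".":
--             return True
--
--         if warehouse[b2y][b2x] in ["[", "]"]:
--             if can_move_box(b2x, b2y, dx, dy, warehouse):
--                 return True
--     if dx == 0:
--         x1, y1 = x, y
--         if warehouse[y][x] == "[":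
--             x2 = x + 1
--             y2 = y
--         else:  # warehouse[y][x] == "]":
--             x2 = x - 1
--             y2 = y
--         bx1, by1 = x1, y1 + dy
--         bx2, by2 = x2, y2 + dy
--         if warehouse[by1][bx1] == "#" or warehouse[by2][bx2] == "#":
--             return False
--         if warehouse[by1][bx1] == "." and warehouse[by2][bx2] == ".":
--             return True
--         # Boxes aligned
--         if warehouse[y1][x1] == warehouse[by1][bx1]:
--             if can_move_box(bx1, by1, dx, dy, warehouse):
--                 return True
--         # Boxes unaligned
--         else:
--             # If both boxes have another box behind them
--             if warehouse[by1][bx1] in ["[", "]"] and warehouse[by2][bx2] in ["[", "]"]: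
--                 if can_move_box(bx1, by1, dx, dy, warehouse) and can_move_box(bx2, by2, dx, dy, warehouse):
--                     return True
--             # If only one box has another box behind it
--             elif warehouse[by1][bx1] in ["[", "]"]:
--                 if can_move_box(bx1, by1, dx, dy, warehouse):
--                     return True
--             elif warehouse[by2][bx2] in ["[", "]"]:
--                 if can_move_box(bx2, by2, dx, dy, warehouse):
--                     return True
--     return False
-- ===== SOURCE B (Python) =====
-- def _push(c, u, v, nxt):
--     # record the left cell of the box half c: u if c is "[", v if c is "]"; deduplicated
--     if c == "[" and u not in nxt:
--         nxt.append(u)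
--     elif c == "]" and v not in nxt:
--         nxt.append(v)
--
--
-- def can_move_box(x: int, y: int, dx: int, dy: int, warehouse: list[list[str]]) -> bool:
--     if dy == 0:
--         # horizontal: boxes form a contiguous run; scan every second cell until a non-box cell
--         i = x + 2 * dx
--         while warehouse[y][i] in ("[", "]"):
--             i += 2 * dx
--         return warehouse[y][i] == "."
--     if dx == 0:
--         # vertical: BFS over box cells level by level, deduplicating each level.
--         lx = x if warehouse[y][x] == "[" else x - 1
--         frontier = [lx]
--         ny = y
--         while frontier:
--             ny += dy
--             nxt = []
--             for bx in frontier: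
--                 if warehouse[ny][bx] == "#":
--                     return False
--                 _push(warehouse[ny][bx], bx, bx - 1, nxt)
--                 if warehouse[ny][bx + 1] == "#":
--                     return False
--                 _push(warehouse[ny][bx + 1], bx + 1, bx, nxt)
--             frontier = nxt
--         return True
--     return False
-- ===== Notes on version B (the rewrite author's own statement) =====
-- stated objective: alternative
-- what changed: A decides pushability by tree recursion over box halves; B instead uses an iterative every-second-cell scan for horizontal pushes and a level-by-level BFS over box left-cells with per-level deduplication, visiting each box at most once per level.
-- outside the precondition, e.g. on can_move_box(2, 0, 0, -1, [['#', '.', '.'], ['#', ']', '.']]): A returns True, B returns False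
import Mathlib
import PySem

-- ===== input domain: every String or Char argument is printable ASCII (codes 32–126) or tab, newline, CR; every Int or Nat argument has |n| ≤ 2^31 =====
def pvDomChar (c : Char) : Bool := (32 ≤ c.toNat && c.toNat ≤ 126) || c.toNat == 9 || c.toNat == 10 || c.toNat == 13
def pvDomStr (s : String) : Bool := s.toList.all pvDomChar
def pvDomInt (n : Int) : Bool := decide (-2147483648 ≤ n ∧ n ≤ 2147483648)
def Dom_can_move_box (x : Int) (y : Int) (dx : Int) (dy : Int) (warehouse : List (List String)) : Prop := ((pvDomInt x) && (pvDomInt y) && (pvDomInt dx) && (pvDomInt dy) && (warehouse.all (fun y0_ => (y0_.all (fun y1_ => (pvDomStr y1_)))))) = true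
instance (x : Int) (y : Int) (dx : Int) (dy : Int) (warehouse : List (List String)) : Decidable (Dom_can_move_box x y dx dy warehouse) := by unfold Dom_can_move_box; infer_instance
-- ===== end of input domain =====

-- B replaces A's tree recursion over box halves by an iterative every-second-cell
-- scan (horizontal) and a level-by-level BFS over box left-cells with per-level
-- deduplication (vertical); objective: alternative algorithm, same proved values.

def pvH (w : List (List String)) : Nat := w.length
def pvW (w : List (List String)) : Nat := (w.headD []).length
def pvFuel (w : List (List String)) : Nat := pvH w + (w.map List.length).sum + 2

-- warehouse[y][x], Python indexing; "" stands in for the out-of-range IndexError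
-- (Pre_ keeps every access in range)
def pvCell (w : List (List String)) (y x : Int) : String :=
  match PySem.List.pyGet? w y with
  | none => ""
  | some row => (PySem.List.pyGet? row x).getD ""

-- ===== PORT A =====
-- fuel = recursion depth guard only; Pre_ guarantees the Python recursion is
-- shallower than pvFuel, so the 0-fuel branch is never reached on Pre_ inputs
def canAux (w : List (List String)) : Nat → Int → Int → Int → Int → Bool
  | 0, _, _, _, _ => false
  | f+1, x, y, dx, dy =>
    let after1 :=
      if dx = 0 then
        let x2 := if pvCell w y x == "[" then x + 1 else x - 1
        let c1 := pvCell w (y + dy) x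
        let c2 := pvCell w (y + dy) x2
        if c1 == "#" || c2 == "#" then false
        else if c1 == "." && c2 == "." then true
        else if pvCell w y x == c1 then
          (if canAux w f x (y + dy) dx dy then true else false)
        else if (c1 == "[" || c1 == "]") && (c2 == "[" || c2 == "]") then
          (if canAux w f x (y + dy) dx dy && canAux w f x2 (y + dy) dx dy then true else false)
        else if c1 == "[" || c1 == "]" then
          (if canAux w f x (y + dy) dx dy then true else false)
        else if c2 == "[" || c2 == "]" then
          (if canAux w f x2 (y + dy) dx dy then true else false)
        else false
      else false
    if dy = 0 then
      if pvCell w y (x + 2 * dx) == "#" then false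
      else if pvCell w y (x + 2 * dx) == "." then true
      else if pvCell w y (x + 2 * dx) == "[" || pvCell w y (x + 2 * dx) == "]" then
        (if canAux w f (x + 2 * dx) y dx dy then true else after1)
      else after1
    else after1

def can_move_box (x : Int) (y : Int) (dx : Int) (dy : Int) (warehouse : List (List String)) : Bool :=
  canAux warehouse (pvFuel warehouse) x y dx dy

-- ===== PORT B =====
-- horizontal: scan every second cell until a non-box cell (fuel = loop guard)
def horizAux (w : List (List String)) : Nat → Int → Int → Int → Bool
  | 0, _, _, _ => false
  | f+1, i, y, dx =>
    if pvCell w y i == "[" || pvCell w y i == "]" then horizAux w f (i + 2 * dx) y dx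
    else pvCell w y i == "."

-- one BFS level: collect the deduplicated left cells of boxes behind the frontier,
-- none = a wall was hit (Python's early `return False`)
-- _push: record the left cell of box half c (u if "[", v if "]"), deduplicated
def addBox (c : String) (u v : Int) (nxt : List Int) : List Int :=
  if c == "[" && !(nxt.contains u) then nxt ++ [u]
  else if c == "]" && !(nxt.contains v) then nxt ++ [v]
  else nxt

def stepAux (w : List (List String)) (ny : Int) : List Int → List Int → Option (List Int)
  | [], acc => some acc
  | bx :: rest, acc =>
    if pvCell w ny bx == "#" then none
    else
      let acc1 := addBox (pvCell w ny bx) bx (bx - 1) acc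
      if pvCell w ny (bx + 1) == "#" then none
      else stepAux w ny rest (addBox (pvCell w ny (bx + 1)) (bx + 1) bx acc1)

def bfsAux (w : List (List String)) (dy : Int) : Nat → Int → List Int → Bool
  | 0, _, frontier => frontier.isEmpty
  | f+1, ny, frontier =>
    if frontier.isEmpty then true
    else
      match stepAux w (ny + dy) frontier [] with
      | none => false
      | some nxt => bfsAux w dy f (ny + dy) nxt

def can_move_box_alt (x : Int) (y : Int) (dx : Int) (dy : Int) (warehouse : List (List String)) : Bool :=
  if dy = 0 then horizAux warehouse (pvFuel warehouse) (x + 2 * dx) y dx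
  else if dx = 0 then
    let lx := if pvCell warehouse y x == "[" then x else x - 1
    bfsAux warehouse dy (pvFuel warehouse) y [lx]
  else false

-- ===== PRECONDITION & SPEC =====
def pvCellN (w : List (List String)) (i j : Nat) : String := (w.getD i []).getD j ""

-- well-formed warehouse: rectangular, walls on all four borders, every cell one of
-- "#" "." "[" "]", and box halves properly paired
def pvWF (w : List (List String)) : Prop :=
  3 ≤ pvH w ∧ 4 ≤ pvW w ∧ (∀ r ∈ w, r.length = pvW w) ∧
  (∀ i < pvH w, ∀ j < pvW w, pvCellN w i j = "#" ∨ pvCellN w i j = "." ∨ pvCellN w i j = "[" ∨ pvCellN w i j = "]") ∧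
  (∀ i < pvH w, ∀ j < pvW w, (i = 0 ∨ i = pvH w - 1 ∨ j = 0 ∨ j = pvW w - 1) → pvCellN w i j = "#") ∧
  (∀ i < pvH w, ∀ j < pvW w, pvCellN w i j = "[" → j + 1 < pvW w ∧ pvCellN w i (j + 1) = "]") ∧
  (∀ i < pvH w, ∀ j < pvW w, pvCellN w i j = "]" → 1 ≤ j ∧ pvCellN w i (j - 1) = "[")

-- Pre_ covers A's three return regions: horizontal pushes (dy = 0, dx ≠ 0) whose
-- first probed cell is in range and either is not a box half or sits in a well-formed
-- bordered warehouse with (x, y) the box half facing the push (so the scan stays in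
-- range); the trivial region dx ≠ 0 ∧ dy ≠ 0, where A touches nothing and returns
-- False; and vertical pushes (dx = 0, unit dy) on the function's natural domain: a
-- well-formed bordered warehouse with (x, y) an interior box half.  It excludes the
-- inputs on which A raises (IndexError / unbounded recursion) and the dx = 0 inputs
-- on malformed grids, where A's value is an accident of negative-index wraparound
-- and of A treating a non-box cell at (x, y) as a "]" half.
def Pre_can_move_box (x : Int) (y : Int) (dx : Int) (dy : Int) (warehouse : List (List String)) : Prop :=
  (dy ≠ 0 ∨ dx ≠ 0) ∧
  (dy ≠ 0 ∨
    (-(warehouse.length : Int) ≤ y ∧ y < (warehouse.length : Int) ∧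
     -(((PySem.List.pyGet? warehouse y).getD []).length : Int) ≤ x + 2 * dx ∧
     x + 2 * dx < (((PySem.List.pyGet? warehouse y).getD []).length : Int) ∧
     (¬(pvCell warehouse y (x + 2 * dx) = "[" ∨ pvCell warehouse y (x + 2 * dx) = "]") ∨
       ((dx = 1 ∨ dx = -1) ∧ pvWF warehouse ∧
        1 ≤ x ∧ x ≤ (pvW warehouse : Int) - 2 ∧ 1 ≤ y ∧ y ≤ (pvH warehouse : Int) - 2 ∧
        (dx = 1 → pvCell warehouse y x = "[") ∧ (dx = -1 → pvCell warehouse y x = "]"))))) ∧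
  (dy = 0 ∨ dx ≠ 0 ∨
    ((dy = 1 ∨ dy = -1) ∧ pvWF warehouse ∧
     1 ≤ x ∧ x ≤ (pvW warehouse : Int) - 2 ∧ 1 ≤ y ∧ y ≤ (pvH warehouse : Int) - 2 ∧
     (pvCell warehouse y x = "[" ∨ pvCell warehouse y x = "]")))

instance (x : Int) (y : Int) (dx : Int) (dy : Int) (warehouse : List (List String)) : Decidable (Pre_can_move_box x y dx dy warehouse) := by
  unfold Pre_can_move_box pvWF
  repeat (first | refine @instDecidableAnd _ _ ?_ ?_ | refine @instDecidableOr _ _ ?_ ?_ |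
    refine @instDecidableNot _ ?_ | infer_instance)

def pvWitness_can_move_box : Int × Int × Int × Int × List (List String) :=
  (1, 1, 0, 1,
   [["#","#","#","#","#"],
    ["#","[","]",".","#"],
    ["#",".",".",".","#"],
    ["#","#","#","#","#"]])

def Spec_can_move_box (x : Int) (y : Int) (dx : Int) (dy : Int) (warehouse : List (List String)) (out : Bool) : Prop := out = can_move_box_alt x y dx dy warehouse
instance (x : Int) (y : Int) (dx : Int) (dy : Int) (warehouse : List (List String)) (out : Bool) : Decidable (Spec_can_move_box x y dx dy warehouse out) := by unfold Spec_can_move_box; infer_instance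

-- ===== CLAIM (what is proved, stated in full; the proofs are below) =====
def Claim_equal_can_move_box : Prop := ∀ (x : Int) (y : Int) (dx : Int) (dy : Int) (warehouse : List (List String)), Dom_can_move_box x y dx dy warehouse → Pre_can_move_box x y dx dy warehouse → Spec_can_move_box x y dx dy warehouse (can_move_box x y dx dy warehouse)

-- ===== LEMMAS AND PROOFS =====

-- interior box with left half at column L, row y
def pvIB (w : List (List String)) (L y : Int) : Prop :=
  0 ≤ L ∧ L + 1 < (pvW w : Int) ∧ 0 ≤ y ∧ y < (pvH w : Int) ∧ pvCell w y L = "["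

-- left cells of the boxes occupying cells (L,ny) and (L+1,ny)
def behindAt (w : List (List String)) (ny L : Int) : List Int :=
  (if pvCell w ny L = "[" then [L] else if pvCell w ny L = "]" then [L - 1] else []) ++
  (if pvCell w ny (L + 1) = "[" then [L + 1] else [])

-- rows left before the border in direction dy
def pvRem (dy : Int) (w : List (List String)) (y : Int) : Int :=
  if dy = 1 then ((pvH w : Int) - 1) - y else y

theorem pv_cell_eq (w : List (List String)) (hrect : ∀ r ∈ w, r.length = pvW w)
    (y x : Int) (hy0 : 0 ≤ y) (hy : y < (pvH w : Int)) (hx0 : 0 ≤ x) (hx : x < (pvW w : Int)) :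
    pvCell w y x = pvCellN w y.toNat x.toNat := by
  have hyn : y.toNat < w.length := by unfold pvH at hy; omega
  have hrow : w[y.toNat]'hyn ∈ w := List.getElem_mem _
  have hlen : (w[y.toNat]'hyn).length = pvW w := hrect _ hrow
  have hxn : x.toNat < (w[y.toNat]'hyn).length := by rw [hlen]; omega
  have h1 : PySem.List.pyGet? w y = some (w[y.toNat]'hyn) := by
    rw [PySem.List.pyGet?_of_nonneg w hy0, List.getElem?_eq_getElem hyn]
  have h2 : PySem.List.pyGet? (w[y.toNat]'hyn) x = some ((w[y.toNat]'hyn)[x.toNat]'hxn) := by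
    rw [PySem.List.pyGet?_of_nonneg _ hx0, List.getElem?_eq_getElem hxn]
  unfold pvCell pvCellN
  rw [h1]
  simp only [h2, Option.getD_some]
  have h3 : w.getD y.toNat [] = w[y.toNat]'hyn := by
    rw [List.getD_eq_getElem?_getD, List.getElem?_eq_getElem hyn]; rfl
  rw [List.getD_eq_getElem?_getD, h3, List.getElem?_eq_getElem hxn]
  rfl

theorem wf_facts (w : List (List String)) (hwf : pvWF w) (y x : Int)
    (hy0 : 0 ≤ y) (hy : y < (pvH w : Int)) (hx0 : 0 ≤ x) (hx : x < (pvW w : Int)) :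
    (pvCell w y x = "#" ∨ pvCell w y x = "." ∨ pvCell w y x = "[" ∨ pvCell w y x = "]")
    ∧ ((y = 0 ∨ y = (pvH w : Int) - 1 ∨ x = 0 ∨ x = (pvW w : Int) - 1) → pvCell w y x = "#")
    ∧ (pvCell w y x = "[" → x + 1 < (pvW w : Int) ∧ pvCell w y (x + 1) = "]")
    ∧ (pvCell w y x = "]" → 1 ≤ x ∧ pvCell w y (x - 1) = "[") := by
  obtain ⟨hH, hW, hrect, halph, hbord, hpr, hpl⟩ := hwf
  have hyn : y.toNat < pvH w := by omega
  have hxn : x.toNat < pvW w := by omega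
  have e : pvCell w y x = pvCellN w y.toNat x.toNat := pv_cell_eq w hrect y x hy0 hy hx0 hx
  refine ⟨?_, ?_, ?_, ?_⟩
  · rw [e]; exact halph _ hyn _ hxn
  · intro hb; rw [e]; apply hbord _ hyn _ hxn
    rcases hb with h|h|h|h
    · left; omega
    · right; left; omega
    · right; right; left; omega
    · right; right; right; omega
  · intro hc; rw [e] at hc
    obtain ⟨hj, hcr⟩ := hpr _ hyn _ hxn hc
    refine ⟨by omega, ?_⟩
    have e2 : pvCell w y (x + 1) = pvCellN w y.toNat (x + 1).toNat :=
      pv_cell_eq w hrect y (x + 1) hy0 hy (by omega) (by omega)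
    have e3 : (x + 1).toNat = x.toNat + 1 := by omega
    rw [e2, e3]; exact hcr
  · intro hc; rw [e] at hc
    obtain ⟨hj, hcl⟩ := hpl _ hyn _ hxn hc
    refine ⟨by omega, ?_⟩
    have e2 : pvCell w y (x - 1) = pvCellN w y.toNat (x - 1).toNat :=
      pv_cell_eq w hrect y (x - 1) hy0 hy (by omega) (by omega)
    have e3 : (x - 1).toNat = x.toNat - 1 := by omega
    rw [e2, e3]; exact hcl

theorem box_interior (w : List (List String)) (hwf : pvWF w) (y x : Int)
    (hy0 : 0 ≤ y) (hy : y < (pvH w : Int)) (hx0 : 0 ≤ x) (hx : x < (pvW w : Int))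
    (hc : pvCell w y x = "[") :
    1 ≤ x ∧ x + 1 ≤ (pvW w : Int) - 2 ∧ 1 ≤ y ∧ y ≤ (pvH w : Int) - 2 := by
  have hH : 3 ≤ pvH w := hwf.1
  have hW : 4 ≤ pvW w := hwf.2.1
  have f1 := wf_facts w hwf y x hy0 hy hx0 hx
  obtain ⟨hlt, hcr⟩ := f1.2.2.1 hc
  have f2 := wf_facts w hwf y (x + 1) hy0 hy (by omega) hlt
  have hx1 : 1 ≤ x := by
    by_contra hb
    have : pvCell w y x = "#" := f1.2.1 (by omega)
    rw [hc] at this; exact absurd this (by decide)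
  have hy1 : 1 ≤ y := by
    by_contra hb
    have : pvCell w y x = "#" := f1.2.1 (by omega)
    rw [hc] at this; exact absurd this (by decide)
  have hy2 : y ≤ (pvH w : Int) - 2 := by
    by_contra hb
    have : pvCell w y x = "#" := f1.2.1 (by omega)
    rw [hc] at this; exact absurd this (by decide)
  have hx2 : x + 1 ≤ (pvW w : Int) - 2 := by
    by_contra hb
    have : pvCell w y (x + 1) = "#" := f2.2.1 (by omega)
    rw [hcr] at this; exact absurd this (by decide)
  exact ⟨hx1, hx2, hy1, hy2⟩

theorem behind_IB (w : List (List String)) (dy : Int) (hwf : pvWF w) (hdy : dy = 1 ∨ dy = -1)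
    (L y z : Int) (hIB : pvIB w L y) (hz : z ∈ behindAt w (y + dy) L) :
    pvIB w z (y + dy) := by
  obtain ⟨hL0, hLW, hy0, hyH, hcL⟩ := hIB
  have hbi := box_interior w hwf y L hy0 hyH hL0 (by omega) hcL
  have hr0 : 0 ≤ y + dy := by rcases hdy with h|h <;> omega
  have hrH : y + dy < (pvH w : Int) := by rcases hdy with h|h <;> omega
  have hfl := wf_facts w hwf (y + dy) L hr0 hrH hL0 (by omega)
  have hfr := wf_facts w hwf (y + dy) (L + 1) hr0 hrH (by omega) (by omega)
  unfold behindAt at hz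
  rw [List.mem_append] at hz
  rcases hz with hz | hz
  · split_ifs at hz with h1 h2
    · rw [List.mem_singleton] at hz
      have hbi2 := box_interior w hwf (y + dy) L hr0 hrH hL0 (by omega) h1
      rw [hz]
      exact ⟨by omega, by omega, hr0, hrH, h1⟩
    · rw [List.mem_singleton] at hz
      obtain ⟨hj, hcl⟩ := hfl.2.2.2 h2
      rw [hz]
      exact ⟨by omega, by omega, hr0, hrH, hcl⟩
    · simp at hz
  · split_ifs at hz with h1
    · rw [List.mem_singleton] at hz
      have hbi3 := box_interior w hwf (y + dy) (L + 1) hr0 hrH (by omega) (by omega) h1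
      rw [hz]
      exact ⟨by omega, by omega, hr0, hrH, h1⟩
    · simp at hz

theorem A_unfold (w : List (List String)) (dy : Int) (hwf : pvWF w) (hdy : dy = 1 ∨ dy = -1) :
    ∀ (f : Nat) (y L h : Int), pvIB w L y → (h = L ∨ h = L + 1) → pvRem dy w y ≤ (f : Int) →
    canAux w f h y 0 dy =
      if pvCell w (y + dy) L = "#" ∨ pvCell w (y + dy) (L + 1) = "#" then false
      else (behindAt w (y + dy) L).all (fun b => canAux w (f - 1) b (y + dy) 0 dy) := by
  intro f
  induction f using Nat.strong_induction_on with
  | _ f ih =>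
  intro y L h hIB hh hrem
  obtain ⟨hL0, hLW, hy0, hyH, hcL⟩ := hIB
  obtain ⟨hL1, hL2, hy1, hy2⟩ := box_interior w hwf y L hy0 hyH hL0 (by omega) hcL
  have hcR : pvCell w y (L + 1) = "]" :=
    ((wf_facts w hwf y L hy0 hyH hL0 (by omega)).2.2.1 hcL).2
  have hdy0 : dy ≠ 0 := by rcases hdy with h'|h' <;> omega
  have hrempos : 1 ≤ pvRem dy w y := by
    rcases hdy with h'|h' <;> subst h' <;> simp [pvRem] <;> omega
  cases f with
  | zero =>
    exfalso
    have : (1 : Int) ≤ 0 := le_trans hrempos hrem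
    omega
  | succ g =>
  have hr0 : 0 ≤ y + dy := by rcases hdy with h'|h' <;> omega
  have hrH : y + dy < (pvH w : Int) := by rcases hdy with h'|h' <;> omega
  have hfl := wf_facts w hwf (y + dy) L hr0 hrH hL0 (by omega)
  have hfr := wf_facts w hwf (y + dy) (L + 1) hr0 hrH (by omega) (by omega)
  have hrem' : pvRem dy w (y + dy) ≤ (g : Int) := by
    rcases hdy with h'|h' <;> subst h' <;> simp [pvRem] at hrem ⊢ <;> omega
  have swap : ∀ L', pvIB w L' (y + dy) →
      canAux w g (L' + 1) (y + dy) 0 dy = canAux w g L' (y + dy) 0 dy := by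
    intro L' hIB'
    rw [ih g (by omega) (y + dy) L' (L' + 1) hIB' (Or.inr rfl) hrem',
        ih g (by omega) (y + dy) L' L' hIB' (Or.inl rfl) hrem']
  have e1 : L + 1 - 1 = L := by ring
  rcases hh with hh | hh <;> rw [hh]
  all_goals rcases hfl.1 with hcl | hcl | hcl | hcl
  -- h = L, cl = "#"
  · simp [canAux, behindAt, hdy0, hcL, hcR, hcl, e1]
  -- h = L, cl = "."
  · rcases hfr.1 with hcr | hcr | hcr | hcr
    · simp [canAux, behindAt, hdy0, hcL, hcR, hcl, hcr, e1]
    · simp [canAux, behindAt, hdy0, hcL, hcR, hcl, hcr, e1]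
    · simp [canAux, behindAt, hdy0, hcL, hcR, hcl, hcr, e1]
    · exfalso
      have := (hfr.2.2.2 hcr).2
      rw [e1, hcl] at this
      exact absurd this (by decide)
  -- h = L, cl = "["
  · have hcr : pvCell w (y + dy) (L + 1) = "]" := (hfl.2.2.1 hcl).2
    simp [canAux, behindAt, hdy0, hcL, hcR, hcl, hcr, e1]
  -- h = L, cl = "]"
  · obtain ⟨hj, hclL⟩ := hfl.2.2.2 hcl
    have hIBl : pvIB w (L - 1) (y + dy) := ⟨by omega, by omega, hr0, hrH, hclL⟩
    have hswap := swap (L - 1) hIBl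
    have e2 : L - 1 + 1 = L := by ring
    rw [e2] at hswap
    rcases hfr.1 with hcr | hcr | hcr | hcr
    · simp [canAux, behindAt, hdy0, hcL, hcR, hcl, hcr, e1]
    · simp [canAux, behindAt, hdy0, hcL, hcR, hcl, hcr, e1, hswap]
    · obtain ⟨hx1, hx2, _, _⟩ := box_interior w hwf (y + dy) (L + 1) hr0 hrH (by omega) (by omega) hcr
      simp [canAux, behindAt, hdy0, hcL, hcR, hcl, hcr, e1, hswap]
    · exfalso
      have := (hfr.2.2.2 hcr).2
      rw [e1, hcl] at this
      exact absurd this (by decide)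
  -- h = L + 1, cl = "#"
  · simp [canAux, behindAt, hdy0, hcL, hcR, hcl, e1]
  -- h = L + 1, cl = "."
  · rcases hfr.1 with hcr | hcr | hcr | hcr
    · simp [canAux, behindAt, hdy0, hcL, hcR, hcl, hcr, e1]
    · simp [canAux, behindAt, hdy0, hcL, hcR, hcl, hcr, e1]
    · simp [canAux, behindAt, hdy0, hcL, hcR, hcl, hcr, e1]
    · exfalso
      have := (hfr.2.2.2 hcr).2
      rw [e1, hcl] at this
      exact absurd this (by decide)
  -- h = L + 1, cl = "["
  · have hcr : pvCell w (y + dy) (L + 1) = "]" := (hfl.2.2.1 hcl).2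
    have hIBL : pvIB w L (y + dy) := ⟨hL0, hLW, hr0, hrH, hcl⟩
    have hswap := swap L hIBL
    simp [canAux, behindAt, hdy0, hcL, hcR, hcl, hcr, e1, hswap]
  -- h = L + 1, cl = "]"
  · obtain ⟨hj, hclL⟩ := hfl.2.2.2 hcl
    have hIBl : pvIB w (L - 1) (y + dy) := ⟨by omega, by omega, hr0, hrH, hclL⟩
    have hswap := swap (L - 1) hIBl
    have e2 : L - 1 + 1 = L := by ring
    rw [e2] at hswap
    rcases hfr.1 with hcr | hcr | hcr | hcr
    · simp [canAux, behindAt, hdy0, hcL, hcR, hcl, hcr, e1]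
    · simp [canAux, behindAt, hdy0, hcL, hcR, hcl, hcr, e1, hswap]
    · obtain ⟨hx1, hx2, _, _⟩ := box_interior w hwf (y + dy) (L + 1) hr0 hrH (by omega) (by omega) hcr
      simp [canAux, behindAt, hdy0, hcL, hcR, hcl, hcr, e1, hswap]
      cases hA : canAux w g (L - 1) (y + dy) 0 dy <;>
        cases hB : canAux w g (L + 1) (y + dy) 0 dy <;> simp [hA, hB]
    · exfalso
      have := (hfr.2.2.2 hcr).2
      rw [e1, hcl] at this
      exact absurd this (by decide)

theorem step_none (w : List (List String)) (ny : Int) :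
    ∀ (S acc : List Int), (∃ b ∈ S, pvCell w ny b = "#" ∨ pvCell w ny (b + 1) = "#") →
    stepAux w ny S acc = none := by
  intro S
  induction S with
  | nil => intro acc h; simp at h
  | cons b rest IH =>
    intro acc h
    simp only [stepAux]
    by_cases h1 : pvCell w ny b = "#"
    · simp [h1]
    · have e1 : (pvCell w ny b == "#") = false := by simp [h1]
      rw [e1]
      by_cases h2 : pvCell w ny (b + 1) = "#"
      · simp [h2]
      · have e2 : (pvCell w ny (b + 1) == "#") = false := by simp [h2]
        simp only [e2, Bool.false_eq_true, if_false]
        apply IH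
        rcases h with ⟨b', hb', hw⟩
        rcases List.mem_cons.mp hb' with rfl | hmem
        · rcases hw with hw | hw
          · exact absurd hw h1
          · exact absurd hw h2
        · exact ⟨b', hmem, hw⟩

theorem mem_addBox (c : String) (u v z : Int) (a : List Int) :
    z ∈ addBox c u v a ↔ (z ∈ a ∨ (c = "[" ∧ z = u) ∨ (c = "]" ∧ z = v)) := by
  unfold addBox
  by_cases h1 : c = "["
  · subst h1
    by_cases hm : u ∈ a
    · simp [hm]
      rintro rfl
      exact hm
    · simp [hm, List.mem_append]
  · by_cases h2 : c = "]"
    · subst h2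
      by_cases hm : v ∈ a
      · simp [hm]
        rintro rfl
        exact hm
      · simp [hm, List.mem_append]
    · simp [h1, h2]

theorem step_some (w : List (List String)) (ny : Int) :
    ∀ (S : List Int), (∀ b ∈ S, pvCell w ny b ≠ "#" ∧ pvCell w ny (b + 1) ≠ "#") →
    (∀ b ∈ S, pvCell w ny (b + 1) = "]" → pvCell w ny b = "[") →
    ∀ acc : List Int, ∃ res, stepAux w ny S acc = some res ∧
      ∀ z, (z ∈ res ↔ z ∈ acc ∨ ∃ b ∈ S, z ∈ behindAt w ny b) := by
  intro S
  induction S with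
  | nil => intro _ _ acc; exact ⟨acc, rfl, by simp⟩
  | cons bh rest IH =>
    intro hnw hpair acc
    obtain ⟨h1, h2⟩ := hnw bh List.mem_cons_self
    obtain ⟨res, hres, hmem⟩ := IH (fun b' hb' => hnw b' (List.mem_cons_of_mem _ hb'))
      (fun b' hb' => hpair b' (List.mem_cons_of_mem _ hb'))
      (addBox (pvCell w ny (bh + 1)) (bh + 1) bh (addBox (pvCell w ny bh) bh (bh - 1) acc))
    have e1 : (pvCell w ny bh == "#") = false := by simp [h1]
    have e2 : (pvCell w ny (bh + 1) == "#") = false := by simp [h2]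
    refine ⟨res, ?_, fun z => ?_⟩
    · simp only [stepAux, e1, e2, Bool.false_eq_true, if_false]
      exact hres
    · rw [hmem z]
      constructor
      · rintro (hz | ⟨b', hb', hz⟩)
        · rw [mem_addBox, mem_addBox] at hz
          rcases hz with (hz | ⟨hc, hzz⟩ | ⟨hc, hzz⟩) | ⟨hc, hzz⟩ | ⟨hc, hzz⟩
          · exact Or.inl hz
          · refine Or.inr ⟨bh, List.mem_cons_self, ?_⟩
            unfold behindAt; rw [List.mem_append]
            exact Or.inl (by simp [hc, hzz])
          · refine Or.inr ⟨bh, List.mem_cons_self, ?_⟩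
            unfold behindAt; rw [List.mem_append]
            exact Or.inl (by simp [hc, hzz])
          · refine Or.inr ⟨bh, List.mem_cons_self, ?_⟩
            unfold behindAt; rw [List.mem_append]
            exact Or.inr (by simp [hc, hzz])
          · have hcl : pvCell w ny bh = "[" := hpair bh List.mem_cons_self hc
            refine Or.inr ⟨bh, List.mem_cons_self, ?_⟩
            unfold behindAt; rw [List.mem_append]
            exact Or.inl (by simp [hcl, hzz])
        · exact Or.inr ⟨b', List.mem_cons_of_mem _ hb', hz⟩
      · rintro (hz | ⟨b', hb', hz⟩)
        · exact Or.inl (by rw [mem_addBox, mem_addBox]; exact Or.inl (Or.inl hz))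
        · rcases List.mem_cons.mp hb' with rfl | hmem2
          · refine Or.inl ?_
            rw [mem_addBox, mem_addBox]
            unfold behindAt at hz
            rw [List.mem_append] at hz
            rcases hz with hz | hz
            · by_cases hc1 : pvCell w ny b' = "["
              · simp [hc1] at hz
                exact Or.inl (Or.inr (Or.inl ⟨hc1, hz⟩))
              · by_cases hc2 : pvCell w ny b' = "]"
                · simp [hc1, hc2] at hz
                  exact Or.inl (Or.inr (Or.inr ⟨hc2, hz⟩))
                · simp [hc1, hc2] at hz
            · by_cases hc1 : pvCell w ny (b' + 1) = "["
              · simp [hc1] at hz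
                exact Or.inr (Or.inl ⟨hc1, hz⟩)
              · simp [hc1] at hz
          · exact Or.inr ⟨b', hmem2, hz⟩

theorem allA_bfs (w : List (List String)) (dy : Int) (hwf : pvWF w) (hdy : dy = 1 ∨ dy = -1) :
    ∀ (g f : Nat) (y : Int) (S : List Int), (∀ b ∈ S, pvIB w b y) →
    pvRem dy w y ≤ (g : Int) → pvRem dy w y ≤ (f : Int) →
    (S.all (fun b => canAux w f b y 0 dy)) = bfsAux w dy g y S := by
  intro g
  induction g with
  | zero =>
    intro f y S hS hg hf
    cases S with
    | nil => simp [bfsAux]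
    | cons b0 rest =>
      exfalso
      obtain ⟨hb0, hbW, hy0, hyH, hcb⟩ := hS b0 List.mem_cons_self
      obtain ⟨_, _, hy1, hy2⟩ := box_interior w hwf y b0 hy0 hyH hb0 (by omega) hcb
      have hrempos : 1 ≤ pvRem dy w y := by
        rcases hdy with h|h <;> subst h <;> simp [pvRem] <;> omega
      have h0 : pvRem dy w y ≤ (0 : Int) := by exact_mod_cast hg
      omega
  | succ g IH =>
    intro f y S hS hg hf
    cases S with
    | nil => simp [bfsAux]
    | cons b0 rest =>
    obtain ⟨hb0, hbW, hy0, hyH, hcb⟩ := hS b0 List.mem_cons_self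
    obtain ⟨_, _, hy1, hy2⟩ := box_interior w hwf y b0 hy0 hyH hb0 (by omega) hcb
    have hrempos : 1 ≤ pvRem dy w y := by
      rcases hdy with h|h <;> subst h <;> simp [pvRem] <;> omega
    cases f with
    | zero =>
      exfalso
      have : (1 : Int) ≤ 0 := le_trans hrempos (by exact_mod_cast hf)
      omega
    | succ f' =>
    have hr0 : 0 ≤ y + dy := by rcases hdy with h|h <;> omega
    have hrH : y + dy < (pvH w : Int) := by rcases hdy with h|h <;> omega
    have hremg : pvRem dy w (y + dy) ≤ (g : Int) := by
      rcases hdy with h|h <;> subst h <;> simp [pvRem] at hg ⊢ <;> omega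
    have hremf : pvRem dy w (y + dy) ≤ (f' : Int) := by
      rcases hdy with h|h <;> subst h <;> simp [pvRem] at hf ⊢ <;> omega
    have hA : ∀ b ∈ b0 :: rest, canAux w (f' + 1) b y 0 dy =
        if pvCell w (y + dy) b = "#" ∨ pvCell w (y + dy) (b + 1) = "#" then false
        else (behindAt w (y + dy) b).all (fun z => canAux w f' z (y + dy) 0 dy) := by
      intro b hb
      have := A_unfold w dy hwf hdy (f' + 1) y b b (hS b hb) (Or.inl rfl) (by exact_mod_cast hf)
      simpa using this
    by_cases hwall : ∃ b ∈ b0 :: rest, pvCell w (y + dy) b = "#" ∨ pvCell w (y + dy) (b + 1) = "#"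
    · have hstep := step_none w (y + dy) (b0 :: rest) [] hwall
      have hbfs : bfsAux w dy (g + 1) y (b0 :: rest) = false := by
        simp [bfsAux, hstep]
      rw [hbfs]
      obtain ⟨b, hb, hw⟩ := hwall
      have hcf : canAux w (f' + 1) b y 0 dy = false := by
        rw [hA b hb, if_pos hw]
      exact List.all_eq_false.mpr ⟨b, hb, by simp [hcf]⟩
    · have hnw : ∀ b ∈ b0 :: rest, pvCell w (y + dy) b ≠ "#" ∧ pvCell w (y + dy) (b + 1) ≠ "#" :=
        fun b hb => ⟨fun hc => hwall ⟨b, hb, Or.inl hc⟩, fun hc => hwall ⟨b, hb, Or.inr hc⟩⟩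
      have hpair : ∀ b ∈ b0 :: rest, pvCell w (y + dy) (b + 1) = "]" → pvCell w (y + dy) b = "[" := by
        intro b hb hc
        obtain ⟨hb0', hbW', _, _, _⟩ := hS b hb
        have hfr := wf_facts w hwf (y + dy) (b + 1) hr0 hrH (by omega) (by omega)
        have h := (hfr.2.2.2 hc).2
        have e : b + 1 - 1 = b := by ring
        rwa [e] at h
      obtain ⟨res, hres, hmem⟩ := step_some w (y + dy) (b0 :: rest) hnw hpair []
      have hbfs : bfsAux w dy (g + 1) y (b0 :: rest) = bfsAux w dy g (y + dy) res := by
        simp [bfsAux, hres]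
      rw [hbfs]
      have hIBres : ∀ z ∈ res, pvIB w z (y + dy) := by
        intro z hz
        rcases (hmem z).mp hz with hz' | ⟨b, hb, hz'⟩
        · simp at hz'
        · exact behind_IB w dy hwf hdy b y z (hS b hb) hz'
      rw [← IH f' (y + dy) res hIBres hremg hremf]
      rw [Bool.eq_iff_iff]
      simp only [List.all_eq_true]
      constructor
      · intro hall z hz
        rcases (hmem z).mp hz with hz' | ⟨b, hb, hz'⟩
        · simp at hz'
        · have h := hall b hb
          rw [hA b hb, if_neg (not_or.mpr (hnw b hb))] at h
          exact (List.all_eq_true.mp h) z hz'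
      · intro hall b hb
        rw [hA b hb, if_neg (not_or.mpr (hnw b hb))]
        exact List.all_eq_true.mpr (fun z hz => hall z ((hmem z).mpr (Or.inr ⟨b, hb, hz⟩)))

theorem horiz_eq (w : List (List String)) (y dx : Int) (hdx : dx ≠ 0) :
    ∀ (f : Nat) (x : Int), canAux w f x y dx 0 = horizAux w f (x + 2 * dx) y dx := by
  intro f
  induction f with
  | zero => intro x; rfl
  | succ g IH =>
    intro x
    simp only [canAux, horizAux, if_neg hdx]
    by_cases h1 : pvCell w y (x + 2 * dx) = "#"
    · simp [h1]
    · by_cases h2 : pvCell w y (x + 2 * dx) = "."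
      · simp [h1, h2]
      · by_cases h3 : pvCell w y (x + 2 * dx) = "[" ∨ pvCell w y (x + 2 * dx) = "]"
        · have := IH (x + 2 * dx)
          rcases h3 with h3 | h3 <;>
            simp [h3, this, add_assoc]
        · rw [not_or] at h3
          simp [h1, h2, h3.1, h3.2]

theorem vert_case (w : List (List String)) (dy : Int) (hdy : dy = 1 ∨ dy = -1)
    (x y : Int) (hwf : pvWF w)
    (hx1 : 1 ≤ x) (hx2 : x ≤ (pvW w : Int) - 2) (hy1 : 1 ≤ y) (hy2 : y ≤ (pvH w : Int) - 2)
    (hbox : pvCell w y x = "[" ∨ pvCell w y x = "]") :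
    canAux w (pvFuel w) x y 0 dy =
      bfsAux w dy (pvFuel w) y [if pvCell w y x == "[" then x else x - 1] := by
  have hH3 : 3 ≤ pvH w := hwf.1
  have hW4 : 4 ≤ pvW w := hwf.2.1
  have hfuel : ((pvH w : Nat) : Int) ≤ ((pvFuel w : Nat) : Int) := by
    have : pvH w ≤ pvFuel w := by unfold pvFuel; omega
    exact_mod_cast this
  have hrem : pvRem dy w y ≤ ((pvFuel w : Nat) : Int) := by
    rcases hdy with h|h <;> subst h <;> simp [pvRem] <;> omega
  obtain ⟨L, hLdef, hIB, hhalf⟩ :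
      ∃ L, (if pvCell w y x == "[" then x else x - 1) = L ∧ pvIB w L y ∧ (x = L ∨ x = L + 1) := by
    rcases hbox with hc | hc
    · refine ⟨x, by simp [hc], ⟨by omega, ?_, by omega, by omega, hc⟩, Or.inl rfl⟩
      have := (wf_facts w hwf y x (by omega) (by omega) (by omega) (by omega)).2.2.1 hc
      omega
    · have hcl := (wf_facts w hwf y x (by omega) (by omega) (by omega) (by omega)).2.2.2 hc
      refine ⟨x - 1, by rw [hc]; simp, ⟨by omega, by omega, by omega, by omega, hcl.2⟩, Or.inr (by ring)⟩
  rw [hLdef]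
  have hux := A_unfold w dy hwf hdy (pvFuel w) y L x hIB hhalf hrem
  have huL := A_unfold w dy hwf hdy (pvFuel w) y L L hIB (Or.inl rfl) hrem
  have hsingle : ([L].all (fun b => canAux w (pvFuel w) b y 0 dy)) = canAux w (pvFuel w) L y 0 dy := by
    simp
  rw [hux, ← huL, ← hsingle]
  exact allA_bfs w dy hwf hdy (pvFuel w) (pvFuel w) y [L]
    (by intro b hb; rw [List.mem_singleton] at hb; rwa [hb]) hrem hrem

-- ===== VERDICT (by name: the statement is the Claim_ definition above) =====
theorem diag_false (w : List (List String)) (x y dx dy : Int)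
    (hdy : dy ≠ 0) (hdx : dx ≠ 0) : ∀ f : Nat, canAux w f x y dx dy = false := by
  intro f
  cases f with
  | zero => rfl
  | succ g => simp [canAux, hdy, hdx]

theorem can_move_box_spec : Claim_equal_can_move_box := by
  intro x y dx dy w _ hpre
  obtain ⟨hpre0, _, hprev⟩ := hpre
  unfold Spec_can_move_box can_move_box can_move_box_alt
  by_cases hdy : dy = 0
  · subst hdy
    rw [if_pos rfl]
    have hdx : dx ≠ 0 := hpre0.resolve_left (by simp)
    exact horiz_eq w y dx hdx (pvFuel w) x
  · rw [if_neg hdy]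
    by_cases hdx : dx = 0
    · subst hdx
      rw [if_pos rfl]
      have hbig : (dy = 1 ∨ dy = -1) ∧ pvWF w ∧ 1 ≤ x ∧ x ≤ (pvW w : Int) - 2 ∧
          1 ≤ y ∧ y ≤ (pvH w : Int) - 2 ∧ (pvCell w y x = "[" ∨ pvCell w y x = "]") := by
        rcases hprev with h | h | h
        · exact absurd h hdy
        · exact absurd rfl h
        · exact h
      obtain ⟨hdy1, hwf, hx1, hx2, hy1, hy2, hbox⟩ := hbig
      exact vert_case w dy hdy1 x y hwf hx1 hx2 hy1 hy2 hbox
    · rw [if_neg hdx, diag_false w x y dx dy hdy hdx]
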